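-- pv_equiv track=rewrite | github.com/posl/comment_recommendation | script/mod_gen/5_time/en/161_D/8.py | lunlun
-- ===== SOURCE A (Python) =====
-- def lunlun(n):
--     if n < 10:
--         return n
--     else:
--         n = str(n)
--         a = int(n[-1])
--         if a == 9:
--             return lunlun(int(n[:-1]))*10 + a
--         else:
--             return lunlun(int(n[:-1]))*10 + a - 1
-- ===== SOURCE B (Python) =====
-- def lunlun(n):
--     if n < 10:
--         return n
--     s = str(n)
--     result = int(s[0])
--     for c in s[1:]:
--         d = int(c)
--         result = result * 10 + (d if d == 9 else d - 1)
--     return result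
-- ===== Notes on version B (the rewrite author's own statement) =====
-- stated objective: simpler
-- what changed: Replaces the last-digit-stripping recursion (which re-stringifies and re-parses the prefix at every level) with a single left-to-right pass over the digit string: keep the leading digit, then fold result = result*10 + (d if d == 9 else d-1) over the remaining characters.
import Mathlib
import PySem

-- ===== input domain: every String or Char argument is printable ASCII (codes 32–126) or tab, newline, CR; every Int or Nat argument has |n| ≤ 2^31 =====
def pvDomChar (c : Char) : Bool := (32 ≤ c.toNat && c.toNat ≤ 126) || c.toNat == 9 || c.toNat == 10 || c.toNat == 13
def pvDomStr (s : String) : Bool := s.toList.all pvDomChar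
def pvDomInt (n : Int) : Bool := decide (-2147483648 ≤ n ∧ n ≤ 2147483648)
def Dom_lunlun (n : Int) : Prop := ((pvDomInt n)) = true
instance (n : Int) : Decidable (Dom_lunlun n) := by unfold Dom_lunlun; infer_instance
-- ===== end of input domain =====

-- Everything from here to PORT A exists only because port A's well-founded recursion must cite
-- pvRecArg_lt by name in its decreasing_by: the recursive argument is int(str(n)[:-1]), so we need
-- the fact that parsing the decimal digits of n without the last one yields n/10.

-- Replica of the (private) digit-run parser inside PySem.Int.ofChars?, so that we can reason about
-- parses of pure digit strings; pvOfChars_digits below connects it to PySem.Int.ofChars?.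
def pvDvGo : List Char → Bool → Nat → Option Nat
  | [], afterDigit, acc => if afterDigit = true then some acc else none
  | c :: rest, afterDigit, acc =>
    if c.isDigit = true then pvDvGo rest true (acc * 10 + (c.toNat - '0'.toNat))
    else
      if c = '_' ∧ afterDigit = true then
        match rest with
        | d :: _tail => if d.isDigit = true then pvDvGo rest false acc else none
        | [] => none
      else none

def pvDv? : List Char → Option Nat
  | [] => none
  | c :: t => pvDvGo (c :: t) false 0

-- every character of a decimal digit string is Nat.digitChar of a digit
def pvDigitStr (ds : List Char) : Prop := ∀ c ∈ ds, ∃ k, k < 10 ∧ c = Nat.digitChar k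

theorem pv_toDigits_ne_nil (n : Nat) : Nat.toDigits 10 n ≠ [] := by
  by_cases h : 10 ≤ n
  · rw [Nat.toDigits_of_base_le (by norm_num) h]; simp
  · rw [Nat.toDigits_of_lt_base (by omega)]; simp

theorem pv_toDigits_digitStr (n : Nat) : pvDigitStr (Nat.toDigits 10 n) := by
  induction n using Nat.strong_induction_on with
  | _ n ih =>
    by_cases h : 10 ≤ n
    · rw [Nat.toDigits_of_base_le (by norm_num) h]
      intro c hc
      rcases List.mem_append.mp hc with hc | hc
      · exact ih (n / 10) (Nat.div_lt_self (by omega) (by norm_num)) c hc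
      · exact ⟨n % 10, Nat.mod_lt _ (by norm_num), by simpa using hc⟩
    · rw [Nat.toDigits_of_lt_base (by omega)]
      intro c hc
      exact ⟨n, by omega, by simpa using hc⟩

theorem pv_digitChar_not_space {k : Nat} (hk : k < 10) :
    PySem.Int.isIntSpace (Nat.digitChar k) = false := by
  interval_cases k <;> decide

theorem pv_digitChar_isDigit {k : Nat} (hk : k < 10) :
    (Nat.digitChar k).isDigit = true := by
  interval_cases k <;> decide

theorem pv_digitChar_val {k : Nat} (hk : k < 10) :
    (Nat.digitChar k).toNat - '0'.toNat = k := by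
  interval_cases k <;> decide

theorem pv_trim_digits (ds : List Char) (hne : ds ≠ []) (hP : pvDigitStr ds) :
    (List.dropWhile PySem.Int.isIntSpace (List.dropWhile PySem.Int.isIntSpace ds).reverse).reverse = ds := by
  have hinner : List.dropWhile PySem.Int.isIntSpace ds = ds := by
    cases ds with
    | nil => simp
    | cons c t =>
      obtain ⟨k, hk, rfl⟩ := hP c (by simp)
      rw [List.dropWhile_cons, pv_digitChar_not_space hk]
      simp
  rw [hinner]
  have houter : List.dropWhile PySem.Int.isIntSpace ds.reverse = ds.reverse := by
    rcases List.eq_nil_or_concat ds with rfl | ⟨t, c, rfl⟩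
    · simp
    · obtain ⟨k, hk, rfl⟩ := hP c (by simp)
      rw [List.concat_eq_append, List.reverse_append, List.reverse_singleton,
        List.singleton_append, List.dropWhile_cons, pv_digitChar_not_space hk]
      simp
  rw [houter, List.reverse_reverse]

-- bridge from PySem's parser to the replica, on nonempty pure digit strings
theorem pvParse_digits (c : Char) (t : List Char) (hP : pvDigitStr (c :: t))
    (htrim : (List.dropWhile PySem.Int.isIntSpace (List.dropWhile PySem.Int.isIntSpace (c :: t)).reverse).reverse = c :: t) :
    PySem.Int.ofChars? (c :: t) =
      Option.map (fun n => n) (do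
        let a ← pvDv? (c :: t)
        pure ((a : Int))) := by
  have hPt : pvDigitStr t := fun x hx => hP x (List.mem_cons_of_mem _ hx)
  obtain ⟨k, hk, hck⟩ := hP c (by simp)
  have hc : c.isDigit = true := hck ▸ pv_digitChar_isDigit hk
  have hcm : c ≠ '-' := by subst hck; interval_cases k <;> decide
  have hcp : c ≠ '+' := by subst hck; interval_cases k <;> decide
  clear hck hk hP
  unfold PySem.Int.ofChars?
  rw [htrim]
  simp only []
  split
  case h_3 hx1 hx2 =>
    clear hx1 hx2 htrim
    congr 1
    congr 1
    conv_lhs => whnf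
    conv_rhs => whnf
    cases hI : instDecidableEqBool c.isDigit true with
    | isFalse hf => exact absurd hc hf
    | isTrue ht =>
      conv_lhs => whnf
      conv_rhs => whnf
      generalize (0 * 10 + (c.toNat - '0'.toNat) : Nat) = acc
      clear hI ht hc hcm hcp c
      revert acc
      induction t with
      | nil => exact fun acc => rfl
      | cons c' t' ih =>
        intro acc
        obtain ⟨k', hk', hck'⟩ := hPt c' (by simp)
        have hc' : c'.isDigit = true := hck' ▸ pv_digitChar_isDigit hk'
        have hPt' : pvDigitStr t' := fun x hx => hPt x (List.mem_cons_of_mem _ hx)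
        conv_lhs => whnf
        conv_rhs => whnf
        cases hI' : instDecidableEqBool c'.isDigit true with
        | isFalse hf => exact absurd hc' hf
        | isTrue ht' =>
          conv_lhs => whnf
          conv_rhs => whnf
          exact ih hPt' (acc * 10 + (c'.toNat - '0'.toNat))
  all_goals
    rename_i r heq
    rw [List.cons.injEq] at heq
    first | exact absurd heq.1 hcm | exact absurd heq.1 hcp

theorem pvDvGo_digits (ds : List Char) (hP : pvDigitStr ds) (acc : Nat) :
    pvDvGo ds true acc = some (ds.foldl (fun a c => a * 10 + (c.toNat - '0'.toNat)) acc) := by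
  induction ds generalizing acc with
  | nil => simp [pvDvGo]
  | cons c t ih =>
    obtain ⟨k, hk, rfl⟩ := hP c (by simp)
    simp only [pvDvGo]
    rw [if_pos (pv_digitChar_isDigit hk)]
    rw [ih (fun x hx => hP x (by simp [hx]))]
    simp

theorem pvDv_digits (c : Char) (t : List Char) (hP : pvDigitStr (c :: t)) :
    pvDv? (c :: t) = some ((c :: t).foldl (fun a c => a * 10 + (c.toNat - '0'.toNat)) 0) := by
  obtain ⟨k, hk, hc⟩ := hP c (by simp)
  simp only [pvDv?, pvDvGo]
  rw [hc, if_pos (pv_digitChar_isDigit hk)]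
  rw [pvDvGo_digits t (fun x hx => hP x (by simp [hx]))]
  simp

theorem pv_foldVal (n : Nat) :
    ∀ acc, (Nat.toDigits 10 n).foldl (fun a c => a * 10 + (c.toNat - '0'.toNat)) acc
      = acc * 10 ^ (Nat.toDigits 10 n).length + n := by
  induction n using Nat.strong_induction_on with
  | _ n ih =>
    intro acc
    by_cases h : 10 ≤ n
    · rw [Nat.toDigits_of_base_le (by norm_num) h]
      rw [List.foldl_append, ih (n / 10) (Nat.div_lt_self (by omega) (by norm_num)) acc]
      simp only [List.foldl_cons, List.foldl_nil, List.length_append, List.length_cons,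
        List.length_nil]
      rw [pv_digitChar_val (Nat.mod_lt _ (by norm_num))]
      have hdm := Nat.div_add_mod n 10
      have hpow : 10 ^ ((Nat.toDigits 10 (n / 10)).length + (0 + 1))
          = 10 ^ (Nat.toDigits 10 (n / 10)).length * 10 := by
        rw [Nat.zero_add, Nat.pow_succ]
      rw [hpow]
      calc (acc * 10 ^ (Nat.toDigits 10 (n / 10)).length + n / 10) * 10 + n % 10
          = acc * (10 ^ (Nat.toDigits 10 (n / 10)).length * 10) + (n / 10 * 10 + n % 10) := by ring
        _ = acc * (10 ^ (Nat.toDigits 10 (n / 10)).length * 10) + n := by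
            exact congrArg (fun z => acc * (10 ^ (Nat.toDigits 10 (n / 10)).length * 10) + z) (by omega)
    · rw [Nat.toDigits_of_lt_base (by omega)]
      simp only [List.foldl_cons, List.foldl_nil, List.length_cons, List.length_nil]
      rw [pv_digitChar_val (by omega)]
      simp
-- roundtrip: parsing back the decimal representation of m gives m
theorem pv_roundtrip (m : Nat) :
    PySem.Int.ofChars? (Nat.toDigits 10 m) = some ((m : Nat) : Int) := by
  have hne := pv_toDigits_ne_nil m
  have hP := pv_toDigits_digitStr m
  cases hds : Nat.toDigits 10 m with
  | nil => exact absurd hds hne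
  | cons c t =>
    have hP' : pvDigitStr (c :: t) := hds ▸ hP
    rw [pvParse_digits c t hP' (pv_trim_digits (c :: t) (by simp) hP')]
    rw [pvDv_digits c t hP']
    have hfold := pv_foldVal m 0
    rw [hds] at hfold
    rw [hfold]
    simp

theorem pv_toChars_natCast (m : Nat) :
    PySem.Int.toChars ((m : Nat) : Int) = Nat.toDigits 10 m := by
  simp [PySem.Int.toChars]

-- the recursive argument int(str(n)[:-1]) equals n / 10, for n ≥ 10
theorem pvRecArg_eq_nat (m : Nat) (hm : 10 ≤ m) :
    (PySem.Int.ofChars? (PySem.List.slice (Nat.toDigits 10 m) none (some (-1)))).getD 0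
      = ((m / 10 : Nat) : Int) := by
  rw [PySem.List.slice_to_neg_one, Nat.toDigits_of_base_le (by norm_num) hm,
    List.dropLast_concat, pv_roundtrip]
  rfl

theorem pvRecArg_eq (n : Int) (h : 10 ≤ n) :
    (PySem.Int.ofChars? (PySem.List.slice (PySem.Int.toChars n) none (some (-1)))).getD 0
      = ((n.toNat / 10 : Nat) : Int) := by
  have h0 : ((n.toNat : Nat) : Int) = n := Int.toNat_of_nonneg (by omega)
  have hm : 10 ≤ n.toNat := by omega
  rw [← h0, pv_toChars_natCast, pvRecArg_eq_nat n.toNat hm]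
  simp

theorem pvRecArg_lt (n : Int) (h : 10 ≤ n) :
    ((PySem.Int.ofChars? (PySem.List.slice (PySem.Int.toChars n) none (some (-1)))).getD 0).toNat
      < n.toNat := by
  rw [pvRecArg_eq n h]
  have : n.toNat / 10 < n.toNat := Nat.div_lt_self (by omega) (by norm_num)
  omega

-- ===== PORT A =====
-- literal transliteration of A: n = str(n); a = int(n[-1]); recurse on int(n[:-1]).
-- The `.getD` defaults are never reached: for n ≥ 10 the digit string is nonempty and all digits.
def lunlun (n : Int) : Int :=
  if n < 10 then n
  else
    let s := PySem.Int.toChars n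
    let a := (PySem.Int.ofChars? [(PySem.List.pyGet? s (-1)).getD '0']).getD 0
    if a = 9 then
      lunlun ((PySem.Int.ofChars? (PySem.List.slice s none (some (-1)))).getD 0) * 10 + a
    else
      lunlun ((PySem.Int.ofChars? (PySem.List.slice s none (some (-1)))).getD 0) * 10 + a - 1
termination_by n.toNat
decreasing_by
  · exact pvRecArg_lt n (by omega)
  · exact pvRecArg_lt n (by omega)

-- ===== PORT B =====
-- literal transliteration of B: s = str(n); result = int(s[0]); one pass over s[1:].
def lunlun_alt (n : Int) : Int :=
  if n < 10 then n
  else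
    let s := PySem.Int.toChars n
    let result := (PySem.Int.ofChars? [(PySem.List.pyGet? s 0).getD '0']).getD 0
    (PySem.List.slice s (some 1) none).foldl
      (fun result c =>
        let d := (PySem.Int.ofChars? [c]).getD 0
        result * 10 + (if d = 9 then d else d - 1)) result

-- ===== PRECONDITION & SPEC =====
def Spec_lunlun (n : Int) (out : Int) : Prop := out = lunlun_alt n
instance (n : Int) (out : Int) : Decidable (Spec_lunlun n out) := by unfold Spec_lunlun; infer_instance

-- ===== CLAIM (what is proved, stated in full; the proofs are below) =====
def Claim_equal_lunlun : Prop := ∀ (n : Int), Dom_lunlun n → Spec_lunlun n (lunlun n)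

-- ===== LEMMAS AND PROOFS =====

-- arithmetic reference function: the common value of both ports on m ≥ 0
def pvTr (k : Nat) : Int := if k = 9 then 9 else (k : Int) - 1

def pvG (m : Nat) : Int :=
  if m < 10 then (m : Int)
  else pvG (m / 10) * 10 + pvTr (m % 10)
termination_by m
decreasing_by exact Nat.div_lt_self (by omega) (by norm_num)

theorem pv_ofChars_singleton {k : Nat} (hk : k < 10) :
    PySem.Int.ofChars? [Nat.digitChar k] = some ((k : Nat) : Int) := by
  interval_cases k <;> decide

theorem pv_lastDigit (m : Nat) (hm : 10 ≤ m) :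
    (PySem.Int.ofChars? [(PySem.List.pyGet? (Nat.toDigits 10 m) (-1)).getD '0']).getD 0
      = ((m % 10 : Nat) : Int) := by
  rw [PySem.List.pyGet?_neg_one, Nat.toDigits_of_base_le (by norm_num) hm,
    List.getLast?_concat]
  simp only [Option.getD_some]
  rw [pv_ofChars_singleton (Nat.mod_lt _ (by norm_num))]
  rfl

theorem pv_lunlun_eq_g (m : Nat) : lunlun ((m : Nat) : Int) = pvG m := by
  induction m using Nat.strong_induction_on with
  | _ m ih =>
    by_cases h : m < 10
    · rw [lunlun, pvG, if_pos (by exact_mod_cast h), if_pos h]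
    · have hm : 10 ≤ m := by omega
      rw [lunlun, if_neg (by exact_mod_cast h)]
      simp only
      rw [pv_toChars_natCast, pv_lastDigit m hm]
      rw [pvRecArg_eq_nat m hm]
      rw [ih (m / 10) (Nat.div_lt_self (by omega) (by norm_num))]
      conv_rhs => rw [pvG]
      rw [if_neg h]
      unfold pvTr
      by_cases h9 : m % 10 = 9
      · rw [if_pos (by exact_mod_cast h9), if_pos h9, h9]
        rfl
      · rw [if_neg (by exact_mod_cast fun hh => h9 (by exact_mod_cast hh)), if_neg h9]
        omega

theorem pv_fold_eq_g (m : Nat) (hm : 1 ≤ m) :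
    (Nat.toDigits 10 m).tail.foldl
      (fun result c =>
        let d := (PySem.Int.ofChars? [c]).getD 0
        result * 10 + (if d = 9 then d else d - 1))
      ((PySem.Int.ofChars? [(PySem.List.pyGet? (Nat.toDigits 10 m) 0).getD '0']).getD 0)
      = pvG m := by
  induction m using Nat.strong_induction_on with
  | _ m ih =>
    by_cases h : m < 10
    · rw [Nat.toDigits_of_lt_base (by omega)]
      simp only [List.tail_cons, List.foldl_nil, PySem.List.pyGet?_zero_cons, Option.getD_some]
      rw [pv_ofChars_singleton (by omega)]
      rw [pvG, if_pos h]
      rfl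
    · have hm10 : 10 ≤ m := by omega
      rw [Nat.toDigits_of_base_le (by norm_num) hm10]
      cases hds : Nat.toDigits 10 (m / 10) with
      | nil => exact absurd hds (pv_toDigits_ne_nil _)
      | cons c t =>
        simp only [List.cons_append, List.tail_cons, PySem.List.pyGet?_zero_cons]
        rw [List.foldl_append]
        have ihm := ih (m / 10) (Nat.div_lt_self (by omega) (by norm_num))
          (Nat.one_le_div_iff (by norm_num) |>.mpr hm10)
        rw [hds] at ihm
        simp only [List.tail_cons, PySem.List.pyGet?_zero_cons] at ihm
        rw [ihm]
        simp only [List.foldl_cons, List.foldl_nil]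
        rw [pv_ofChars_singleton (Nat.mod_lt _ (by norm_num))]
        simp only [Option.getD_some]
        conv_rhs => rw [pvG]
        rw [if_neg h]
        unfold pvTr
        by_cases h9 : m % 10 = 9
        · rw [if_pos (by exact_mod_cast h9), if_pos h9, h9]
          rfl
        · rw [if_neg (by exact_mod_cast fun hh => h9 (by exact_mod_cast hh)), if_neg h9]

theorem pv_lunlun_alt_eq_g (m : Nat) (hm : 10 ≤ m) :
    lunlun_alt ((m : Nat) : Int) = pvG m := by
  rw [lunlun_alt, if_neg (by exact_mod_cast not_lt.mpr hm : ¬ ((m : Nat) : Int) < 10)]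
  simp only
  rw [pv_toChars_natCast, PySem.List.slice_from_one]
  exact pv_fold_eq_g m (by omega)

-- ===== VERDICT (by name: the statement is the Claim_ definition above) =====
theorem lunlun_spec : Claim_equal_lunlun := by
  intro n _
  unfold Spec_lunlun
  by_cases h : n < 10
  · rw [lunlun, lunlun_alt, if_pos h, if_pos h]
  · have h0 : ((n.toNat : Nat) : Int) = n := Int.toNat_of_nonneg (by omega)
    have hm : 10 ≤ n.toNat := by omega
    rw [← h0, pv_lunlun_eq_g, pv_lunlun_alt_eq_g n.toNat hm]
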